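-- pv_equiv track=rewrite | github.com/Medina-Mardones/simplicial_operators | simplicial_operators/Simplicial_operators.py | face_maps_sort
-- ===== SOURCE A (Python) =====
-- def face_maps_sort(face_maps):
--     '''puts the face maps in canonical order d < ... < d using the
--     simplicial identity d_i d_j = d_j d_{i+1} if i >= j'''
--
--     face_maps = list(face_maps)
--     for index in range(1, len(face_maps)):
--
--         currentvalue = face_maps[index]
--         position = index
--
--         while (position > 0 and
--                face_maps[position-1] >= currentvalue):
--
--             face_maps[position] = face_maps[position-1]+1
--             position = position-1
--
--         face_maps[position] = currentvalue
--
--     return tuple(face_maps)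
-- ===== SOURCE B (Python) =====
-- def face_maps_sort(face_maps):
--     '''canonical strictly-increasing form via d_i d_j = d_j d_{i+1} (i >= j):
--     scan left-to-right for the insertion rank, rebuild as
--     prefix + [v] + bumped suffix instead of shifting in place'''
--     acc = []
--     for v in face_maps:
--         i = 0
--         while i < len(acc) and acc[i] < v:
--             i += 1
--         acc = acc[:i] + [v] + [x + 1 for x in acc[i:]]
--     return tuple(acc)
-- ===== Notes on version B (the rewrite author's own statement) =====
-- stated objective: alternative
-- what changed: A does an in-place insertion-sort variant that walks right-to-left shifting each displaced element by +1; B scans left-to-right for the insertion rank and rebuilds the list as prefix + [v] + (suffix each +1), never mutating in place.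
import Mathlib
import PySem

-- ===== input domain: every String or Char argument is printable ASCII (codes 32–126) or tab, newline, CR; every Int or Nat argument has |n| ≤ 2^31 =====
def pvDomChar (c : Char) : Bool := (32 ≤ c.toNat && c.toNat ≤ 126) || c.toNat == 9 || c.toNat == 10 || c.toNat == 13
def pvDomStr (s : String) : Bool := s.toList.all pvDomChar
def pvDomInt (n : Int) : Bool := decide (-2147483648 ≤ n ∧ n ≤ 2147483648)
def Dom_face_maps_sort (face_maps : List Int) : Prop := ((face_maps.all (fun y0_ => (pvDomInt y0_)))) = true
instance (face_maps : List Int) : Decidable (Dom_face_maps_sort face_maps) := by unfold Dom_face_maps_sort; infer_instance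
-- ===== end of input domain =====

-- B replaces A's in-place right-to-left shifting insertion by a left-to-right rank
-- scan that rebuilds the list as prefix ++ [v] ++ bumped suffix (objective: alternative).

-- ===== PORT A =====
-- inner while loop of A: while position > 0 and fm[position-1] >= cur:
--   fm[position] = fm[position-1]+1; position -= 1; finally fm[position] = cur
def shiftA (fm : List Int) (cur : Int) : Nat → List Int
  | 0 => fm.set 0 cur
  | pos + 1 =>
    if cur ≤ fm.getD pos 0 then
      shiftA (fm.set (pos + 1) (fm.getD pos 0 + 1)) cur pos
    else
      fm.set (pos + 1) cur

-- for index in range(1, len(face_maps)): …  (indices are always in range, so getD is exact)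
def face_maps_sort (face_maps : List Int) : List Int :=
  (List.range' 1 (face_maps.length - 1)).foldl
    (fun acc index => shiftA acc (acc.getD index 0) index) face_maps

-- ===== PORT B =====
-- i = 0; while i < len(acc) and acc[i] < v: i += 1   (length of the leading run < v)
def rankB (v : Int) : List Int → Nat
  | [] => 0
  | x :: xs => if x < v then rankB v xs + 1 else 0

-- acc = acc[:i] + [v] + [x + 1 for x in acc[i:]]
def stepB (acc : List Int) (v : Int) : List Int :=
  acc.take (rankB v acc) ++ v :: (acc.drop (rankB v acc)).map (fun x => x + 1)

def face_maps_sort_alt (face_maps : List Int) : List Int :=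
  face_maps.foldl stepB []

-- ===== PRECONDITION & SPEC =====
def Spec_face_maps_sort (face_maps : List Int) (out : List Int) : Prop := out = face_maps_sort_alt face_maps
instance (face_maps : List Int) (out : List Int) : Decidable (Spec_face_maps_sort face_maps out) := by unfold Spec_face_maps_sort; infer_instance

-- ===== CLAIM (what is proved, stated in full; the proofs are below) =====
def Claim_equal_face_maps_sort : Prop := ∀ (face_maps : List Int), Dom_face_maps_sort face_maps → Spec_face_maps_sort face_maps (face_maps_sort face_maps)

-- ===== LEMMAS AND PROOFS =====

-- structural form of B's insertion step, convenient for induction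
def insB (v : Int) : List Int → List Int
  | [] => [v]
  | x :: xs => if v ≤ x then v :: (x + 1) :: xs.map (fun y => y + 1) else x :: insB v xs

lemma stepB_eq_insB (acc : List Int) (v : Int) : stepB acc v = insB v acc := by
  induction acc with
  | nil => simp [stepB, rankB, insB]
  | cons x xs ih =>
    by_cases h : x < v
    · have hv : ¬ v ≤ x := by omega
      simp [stepB, rankB, insB, h, hv] at ih ⊢
      exact ih
    · have hv : v ≤ x := by omega
      simp [stepB, rankB, insB, h, hv]

lemma insB_length (v : Int) (l : List Int) : (insB v l).length = l.length + 1 := by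
  induction l with
  | nil => simp [insB]
  | cons x xs ih => by_cases h : v ≤ x <;> simp [insB, h, ih]

lemma mem_insB {a v : Int} {l : List Int} (h : a ∈ insB v l) :
    a = v ∨ a ∈ l ∨ ∃ b ∈ l, a = b + 1 := by
  induction l with
  | nil => simp [insB] at h; tauto
  | cons x xs ih =>
    by_cases hx : v ≤ x
    · simp [insB, hx] at h
      rcases h with h | h | ⟨b, hb, hba⟩
      · tauto
      · exact Or.inr (Or.inr ⟨x, by simp, by omega⟩)
      · exact Or.inr (Or.inr ⟨b, by simp [hb], by omega⟩)
    · simp [insB, hx] at h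
      rcases h with h | h
      · exact Or.inr (Or.inl (by simp [h]))
      · rcases ih h with h | h | ⟨b, hb, hba⟩
        · tauto
        · exact Or.inr (Or.inl (by simp [h]))
        · exact Or.inr (Or.inr ⟨b, by simp [hb], hba⟩)

lemma pairwise_insB (v : Int) {l : List Int} (h : l.Pairwise (· ≤ ·)) :
    (insB v l).Pairwise (· ≤ ·) := by
  induction l with
  | nil => simp [insB]
  | cons x xs ih =>
    rcases List.pairwise_cons.mp h with ⟨hx, hxs⟩
    by_cases hv : v ≤ x
    · simp only [insB, if_pos hv]
      refine List.pairwise_cons.mpr ⟨?_, List.pairwise_cons.mpr ⟨?_, ?_⟩⟩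
      · intro a ha
        simp at ha
        rcases ha with ha | ⟨b, hb, hba⟩
        · omega
        · have := hx b hb; omega
      · intro a ha
        simp at ha
        rcases ha with ⟨b, hb, hba⟩
        have := hx b hb; omega
      · rw [List.pairwise_map]
        exact hxs.imp (by intro a b hab; omega)
    · simp only [insB, if_neg hv]
      refine List.pairwise_cons.mpr ⟨?_, ih hxs⟩
      intro a ha
      rcases mem_insB ha with h | h | ⟨b, hb, hba⟩
      · omega
      · exact hx a h
      · have := hx b hb; omega

lemma insB_append_ge {v p : Int} (Q : List Int) (h : v ≤ p) :
    insB v (Q ++ [p]) = insB v Q ++ [p + 1] := by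
  induction Q with
  | nil => simp [insB, h]
  | cons x xs ih =>
    by_cases hx : v ≤ x
    · simp [insB, hx]
    · simp [insB, hx, ih]

lemma insB_lt_all {v : Int} {P : List Int} (h : ∀ q ∈ P, q < v) :
    insB v P = P ++ [v] := by
  induction P with
  | nil => simp [insB]
  | cons x xs ih =>
    have hx : ¬ v ≤ x := by have := h x (by simp); omega
    simp only [insB, if_neg hx, List.cons_append, List.cons.injEq, true_and]
    exact ih (fun q hq => h q (by simp [hq]))

lemma getD_append_cons (Q t : List Int) (p : Int) :
    (Q ++ p :: t).getD Q.length 0 = p := by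
  induction Q with
  | nil => simp
  | cons x xs ih => simp [ih]

lemma set_append_add (Q t : List Int) (n : Nat) (y : Int) :
    (Q ++ t).set (Q.length + n) y = Q ++ t.set n y := by
  induction Q with
  | nil => simp
  | cons x xs ih => simp [Nat.succ_add, ih]

lemma shiftA_spec : ∀ (P : List Int), P.Pairwise (· ≤ ·) →
    ∀ (x cur : Int) (R : List Int),
      shiftA (P ++ x :: R) cur P.length = insB cur P ++ R := by
  intro P
  induction P using List.reverseRecOn with
  | nil => intro _ x cur R; simp [shiftA, insB]
  | append_singleton Q p ih =>
    intro hp x cur R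
    rcases List.pairwise_append.mp hp with ⟨hQ, _, hQp⟩
    have hlen : (Q ++ [p]).length = Q.length + 1 := by simp
    rw [hlen]
    have hform : Q ++ [p] ++ x :: R = Q ++ p :: x :: R := by simp
    rw [hform]
    show (if cur ≤ (Q ++ p :: x :: R).getD Q.length 0 then
        shiftA ((Q ++ p :: x :: R).set (Q.length + 1) ((Q ++ p :: x :: R).getD Q.length 0 + 1)) cur Q.length
      else (Q ++ p :: x :: R).set (Q.length + 1) cur) = insB cur (Q ++ [p]) ++ R
    rw [getD_append_cons]
    by_cases h : cur ≤ p
    · rw [if_pos h, set_append_add Q (p :: x :: R) 1 (p + 1)]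
      show shiftA (Q ++ p :: (p + 1) :: R) cur Q.length = _
      rw [ih hQ p cur ((p + 1) :: R), insB_append_ge Q h]
      simp
    · rw [if_neg h, set_append_add Q (p :: x :: R) 1 cur]
      have : ∀ q ∈ Q ++ [p], q < cur := by
        intro q hq
        simp at hq
        rcases hq with hq | hq
        · have := hQp q hq p (by simp); omega
        · omega
      rw [insB_lt_all this]
      simp

lemma fold_spec : ∀ (suf done : List Int), done.Pairwise (· ≤ ·) →
    (List.range' done.length suf.length).foldl
        (fun acc index => shiftA acc (acc.getD index 0) index) (done ++ suf)
      = suf.foldl (fun a v => insB v a) done := by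
  intro suf
  induction suf with
  | nil => intro done _; simp
  | cons v t ih =>
    intro done hd
    rw [List.length_cons, List.range'_succ, List.foldl_cons]
    have hget : (done ++ v :: t).getD done.length 0 = v := getD_append_cons done t v
    rw [hget, shiftA_spec done hd v v t]
    have hlen : done.length + 1 = (insB v done).length := by rw [insB_length]
    rw [hlen, ih (insB v done) (pairwise_insB v hd)]
    simp

lemma alt_eq_foldl_insB (fm : List Int) :
    face_maps_sort_alt fm = fm.foldl (fun a v => insB v a) [] := by
  unfold face_maps_sort_alt
  congr 1
  funext a v
  exact stepB_eq_insB a v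

-- ===== VERDICT (by name: the statement is the Claim_ definition above) =====
theorem face_maps_sort_spec : Claim_equal_face_maps_sort := by
  intro fm _
  unfold Spec_face_maps_sort
  rw [alt_eq_foldl_insB]
  cases fm with
  | nil => simp [face_maps_sort]
  | cons x t =>
    unfold face_maps_sort
    have h1 : (x :: t).length - 1 = t.length := by simp
    rw [h1]
    show (List.range' ([x] : List Int).length t.length).foldl _ ([x] ++ t) = _
    rw [fold_spec t [x] (by simp)]
    simp [insB]
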